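-- pv_equiv track=rewrite | github.com/souta-pqr/ESPnetExp | B4/1026/disfluency.py | align_words
-- ===== SOURCE A (Python) =====
-- def align_words(ref_words, hyp_words):
--     n = len(ref_words)
--     m = len(hyp_words)
--     dp = [[0] * (m + 1) for _ in range(n + 1)]
--
--     for i in range(1, n + 1):
--         for j in range(1, m + 1):
--             if any(ref_word in hyp_word or hyp_word in ref_word for ref_word in ref_words[i - 1].split() for hyp_word in hyp_words[j - 1].split()):
--                 dp[i][j] = dp[i - 1][j - 1] + 1
--             else:
--                 dp[i][j] = max(dp[i - 1][j], dp[i][j - 1])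
--
--     alignment = []
--     i, j = n, m
--     while i > 0 and j > 0:
--         if any(ref_word in hyp_word or hyp_word in ref_word for ref_word in ref_words[i - 1].split() for hyp_word in hyp_words[j - 1].split()):
--             alignment.append((ref_words[i - 1], hyp_words[j - 1]))
--             i -= 1
--             j -= 1
--         elif dp[i - 1][j] > dp[i][j - 1]:
--             alignment.append((ref_words[i - 1], ""))
--             i -= 1
--         else:
--             alignment.append(("", hyp_words[j - 1]))
--             j -= 1
--
--     while i > 0:
--         alignment.append((ref_words[i - 1], ""))
--         i -= 1
--
--     while j > 0:
--         alignment.append(("", hyp_words[j - 1]))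
--         j -= 1
--
--     alignment.reverse()
--     return alignment
-- ===== SOURCE B (Python) =====
-- def align_words(ref_words, hyp_words):
--     n, m = len(ref_words), len(hyp_words)
--     refs = [w.split() for w in ref_words]
--     hyps = [w.split() for w in hyp_words]
--
--     def match(rs, hs):
--         return any(r in h or h in r for r in rs for h in hs)
--
--     def bisect_gt(a, x):
--         lo, hi = 0, len(a)
--         while lo < hi:
--             mid = (lo + hi) // 2
--             if a[mid] <= x:
--                 lo = mid + 1
--             else:
--                 hi = mid
--         return lo
--
--     # Hunt-Szymanski-style threshold rows: rows[i][k-1] = smallest j with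
--     # LCS(ref[:i], hyp[:j]) >= k under the fuzzy match relation; each row is
--     # a short strictly increasing list instead of a length-(m+1) dp row.
--     rows = [[]]
--     thr = []
--     for rs in refs:
--         cols = [j for j in range(1, m + 1) if match(rs, hyps[j - 1])]
--         new = []
--         prev = 0
--         for old in thr:
--             p = bisect_gt(cols, prev)
--             new.append(min(old, cols[p]) if p < len(cols) else old)
--             prev = old
--         p = bisect_gt(cols, prev)
--         if p < len(cols):
--             new.append(cols[p])
--         thr = new
--         rows.append(thr)
--
--     def lcs(i, j):  # dp value = number of thresholds of row i that are <= j
--         return bisect_gt(rows[i], j)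
--
--     out = []
--     i, j = n, m
--     while i > 0 and j > 0:
--         if match(refs[i - 1], hyps[j - 1]):
--             out.append((ref_words[i - 1], hyp_words[j - 1]))
--             i -= 1
--             j -= 1
--         elif lcs(i - 1, j) > lcs(i, j - 1):
--             out.append((ref_words[i - 1], ""))
--             i -= 1
--         else:
--             out.append(("", hyp_words[j - 1]))
--             j -= 1
--     while i > 0:
--         out.append((ref_words[i - 1], ""))
--         i -= 1
--     while j > 0:
--         out.append(("", hyp_words[j - 1]))
--         j -= 1
--     out.reverse()
--     return out
-- ===== Notes on version B (the rewrite author's own statement) =====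
-- stated objective: alternative
-- what changed: B replaces A's (n+1)x(m+1) dp table and dp-comparison traceback by a Hunt-Szymanski-style threshold representation: each dp row is kept as a short strictly increasing list of column thresholds updated per row via hand-rolled binary search, words are split once up front, and the traceback reads dp values by binary-searching the stored threshold rows; it trades the quadratic table for O(n*L) threshold storage.
import Mathlib
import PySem

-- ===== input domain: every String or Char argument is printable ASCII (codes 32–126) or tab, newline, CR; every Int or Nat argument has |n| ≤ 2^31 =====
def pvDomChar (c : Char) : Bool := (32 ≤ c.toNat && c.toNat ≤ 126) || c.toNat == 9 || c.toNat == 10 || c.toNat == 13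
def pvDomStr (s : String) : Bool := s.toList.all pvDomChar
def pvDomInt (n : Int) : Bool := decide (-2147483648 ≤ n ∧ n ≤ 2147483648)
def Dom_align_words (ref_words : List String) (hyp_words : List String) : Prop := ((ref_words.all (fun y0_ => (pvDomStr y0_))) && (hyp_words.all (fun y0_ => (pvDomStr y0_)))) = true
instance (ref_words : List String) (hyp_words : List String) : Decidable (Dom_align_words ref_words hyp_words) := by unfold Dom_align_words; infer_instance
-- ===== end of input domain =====

-- B replaces A's rectangular dp table by Hunt–Szymanski-style threshold lists (one short
-- strictly increasing list of column thresholds per row, queried by binary search) and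
-- splits every word once; an alternative algorithm for the same exact alignment.

-- ===== PORT A =====
-- the inline 'any(... for ref_word in r.split() for hyp_word in h.split())' predicate
def pvAnyMatch (r h : String) : Bool :=
  (PySem.Str.split₀ r).any fun rw => (PySem.Str.split₀ h).any fun hw =>
    PySem.Str.isIn rw hw || PySem.Str.isIn hw rw

-- dp[i][j] read/write on a rectangular list-of-lists table (all indices used are in range,
-- where Python's t[i][j] and Lean's getD/set agree exactly)
def pvGet2 (t : List (List Nat)) (i j : Nat) : Nat := (t.getD i []).getD j 0
def pvSet2 (t : List (List Nat)) (i j v : Nat) : List (List Nat) :=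
  t.set i ((t.getD i []).set j v)

-- the body of A's doubly-nested dp loop at (i, j), i.e. dp[i][j] = …
def pvStepA (ref hyp : List String) (dp : List (List Nat)) (i j : Nat) : List (List Nat) :=
  if pvAnyMatch (ref.getD (i - 1) "") (hyp.getD (j - 1) "") then
    pvSet2 dp i j (pvGet2 dp (i - 1) (j - 1) + 1)
  else
    pvSet2 dp i j (max (pvGet2 dp (i - 1) j) (pvGet2 dp i (j - 1)))

-- 'for i in range(1, n+1): for j in range(1, m+1): …' (loop indices are in-range naturals)
def pvFillA (ref hyp : List String) (n m : Nat) : List (List Nat) :=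
  (PySem.List.pyRange 1 ((n : Int) + 1) 1).foldl (fun dp i =>
    (PySem.List.pyRange 1 ((m : Int) + 1) 1).foldl (fun dp j =>
      pvStepA ref hyp dp i.toNat j.toNat) dp)
    (List.replicate (n + 1) (List.replicate (m + 1) 0))

-- 'while i > 0: alignment.append((ref_words[i-1], "")); i -= 1'
def pvDrainRef (ref : List String) : Nat → List (String × String) → List (String × String)
  | 0, acc => acc
  | i + 1, acc => pvDrainRef ref i (acc ++ [(ref.getD i "", "")])

-- 'while j > 0: alignment.append(("", hyp_words[j-1])); j -= 1'
def pvDrainHyp (hyp : List String) : Nat → List (String × String) → List (String × String)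
  | 0, acc => acc
  | j + 1, acc => pvDrainHyp hyp j (acc ++ [("", hyp.getD j "")])

-- the 'while i > 0 and j > 0' loop (then both drains); acc is the alignment list so far
def pvTraceA (ref hyp : List String) (dp : List (List Nat)) :
    Nat → Nat → List (String × String) → List (String × String)
  | i + 1, j + 1, acc =>
    if pvAnyMatch (ref.getD i "") (hyp.getD j "") then
      pvTraceA ref hyp dp i j (acc ++ [(ref.getD i "", hyp.getD j "")])
    else if pvGet2 dp i (j + 1) > pvGet2 dp (i + 1) j then
      pvTraceA ref hyp dp i (j + 1) (acc ++ [(ref.getD i "", "")])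
    else
      pvTraceA ref hyp dp (i + 1) j (acc ++ [("", hyp.getD j "")])
  | i, 0, acc => pvDrainHyp hyp 0 (pvDrainRef ref i acc)
  | 0, j, acc => pvDrainHyp hyp j (pvDrainRef ref 0 acc)
  termination_by i j _ => i + j

def align_words (ref_words : List String) (hyp_words : List String) : List (String × String) :=
  let n := ref_words.length
  let m := hyp_words.length
  let dp := pvFillA ref_words hyp_words n m
  (pvTraceA ref_words hyp_words dp n m []).reverse

-- ===== PORT B =====
-- Source B's 'match(rs, hs)' over pre-split word lists
def pvMatchL (rs hs : List String) : Bool :=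
  rs.any fun r => hs.any fun h => PySem.Str.isIn r h || PySem.Str.isIn h r

-- Source B's hand-rolled 'bisect_gt' loop: while lo < hi: mid = (lo+hi)//2; …
def pvBisGo (a : List Int) (x : Int) (lo hi : Nat) : Nat :=
  if h : lo < hi then
    let mid := (lo + hi) / 2
    if a.getD mid 0 ≤ x then pvBisGo a x (mid + 1) hi else pvBisGo a x lo mid
  else lo
  termination_by hi - lo
  decreasing_by all_goals omega

def pvBisGt (a : List Int) (x : Int) : Nat := pvBisGo a x 0 a.length

-- one row update: 'for old in thr: …' then the trailing extension append
def pvRowUpd (cols T : List Int) : List Int :=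
  let s := T.foldl (fun (s : List Int × Int) old =>
    let p := pvBisGt cols s.2
    (s.1 ++ [if p < cols.length then min old (cols.getD p 0) else old], old)) ([], 0)
  let p := pvBisGt cols s.2
  if p < cols.length then s.1 ++ [cols.getD p 0] else s.1

-- 'rows = [[]]; thr = []; for rs in refs: cols = [j for j in range(1, m+1) if match(...)]; …'
def pvFillThr (hyps : List (List String)) (m : Nat) (refs : List (List String)) :
    List (List Int) × List Int :=
  refs.foldl (fun (s : List (List Int) × List Int) rs =>
    let cols := (PySem.List.pyRange 1 ((m : Int) + 1) 1).filter
      (fun j => pvMatchL rs (hyps.getD (j - 1).toNat []))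
    let T := pvRowUpd cols s.2
    (s.1 ++ [T], T)) ([[]], [])

-- 'def lcs(i, j): return bisect_gt(rows[i], j)'
def pvLcs (rows : List (List Int)) (i : Nat) (j : Int) : Nat := pvBisGt (rows.getD i []) j

-- B's 'while i > 0 and j > 0' loop; decisions read lcs counts from the threshold rows
def pvTraceB (ref hyp : List String) (refs hyps : List (List String))
    (rows : List (List Int)) :
    Nat → Nat → List (String × String) → List (String × String)
  | i + 1, j + 1, acc =>
    if pvMatchL (refs.getD i []) (hyps.getD j []) then
      pvTraceB ref hyp refs hyps rows i j (acc ++ [(ref.getD i "", hyp.getD j "")])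
    else if pvLcs rows i ((j : Int) + 1) > pvLcs rows (i + 1) (j : Int) then
      pvTraceB ref hyp refs hyps rows i (j + 1) (acc ++ [(ref.getD i "", "")])
    else
      pvTraceB ref hyp refs hyps rows (i + 1) j (acc ++ [("", hyp.getD j "")])
  | i, 0, acc => pvDrainHyp hyp 0 (pvDrainRef ref i acc)
  | 0, j, acc => pvDrainHyp hyp j (pvDrainRef ref 0 acc)
  termination_by i j _ => i + j

def align_words_alt (ref_words : List String) (hyp_words : List String) : List (String × String) :=
  let n := ref_words.length
  let m := hyp_words.length
  let refs := ref_words.map PySem.Str.split₀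
  let hyps := hyp_words.map PySem.Str.split₀
  let rows := (pvFillThr hyps m refs).1
  (pvTraceB ref_words hyp_words refs hyps rows n m []).reverse

-- ===== PRECONDITION & SPEC =====
def Spec_align_words (ref_words : List String) (hyp_words : List String) (out : List (String × String)) : Prop := out = align_words_alt ref_words hyp_words
instance (ref_words : List String) (hyp_words : List String) (out : List (String × String)) : Decidable (Spec_align_words ref_words hyp_words out) := by unfold Spec_align_words; infer_instance

-- ===== CLAIM (what is proved, stated in full; the proofs are below) =====
def Claim_equal_align_words : Prop := ∀ (ref_words : List String) (hyp_words : List String), Dom_align_words ref_words hyp_words → Spec_align_words ref_words hyp_words (align_words ref_words hyp_words)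

-- ===== LEMMAS AND PROOFS =====

-- the match predicate as a function of word indices
def pvMt (ref hyp : List String) (a b : Nat) : Bool :=
  pvAnyMatch (ref.getD a "") (hyp.getD b "")

-- the mathematical LCS-style dp value
def pvDpF (mt : Nat → Nat → Bool) : Nat → Nat → Nat
  | 0, _ => 0
  | _ + 1, 0 => 0
  | i + 1, j + 1 =>
    if mt i j then pvDpF mt i j + 1
    else max (pvDpF mt i (j + 1)) (pvDpF mt (i + 1) j)
  termination_by i j => i + j

lemma pvDpF_zero_left (mt : Nat → Nat → Bool) (b : Nat) : pvDpF mt 0 b = 0 := by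
  cases b <;> simp [pvDpF]

lemma pvDpF_zero_right (mt : Nat → Nat → Bool) (a : Nat) : pvDpF mt a 0 = 0 := by
  cases a <;> simp [pvDpF]

lemma pvDpF_succ (mt : Nat → Nat → Bool) (i j : Nat) :
    pvDpF mt (i + 1) (j + 1) =
      if mt i j then pvDpF mt i j + 1
      else max (pvDpF mt i (j + 1)) (pvDpF mt (i + 1) j) := by
  rw [pvDpF]

-- the four step/monotonicity facts, proved simultaneously by induction on i + j
lemma pvDpF_bounds (mt : Nat → Nat → Bool) :
    ∀ (s i j : Nat), i + j ≤ s →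
      (pvDpF mt i j ≤ pvDpF mt i (j + 1)) ∧
      (pvDpF mt i (j + 1) ≤ pvDpF mt i j + 1) ∧
      (pvDpF mt (i + 1) j ≤ pvDpF mt i j + 1) ∧
      (pvDpF mt i j ≤ pvDpF mt (i + 1) j) := by
  intro s
  induction s with
  | zero =>
    intro i j h
    obtain ⟨rfl, rfl⟩ : i = 0 ∧ j = 0 := by omega
    simp [pvDpF_zero_left, pvDpF_zero_right]
  | succ s ih =>
    intro i j h
    refine ⟨?_, ?_, ?_, ?_⟩
    · -- F i j ≤ F i (j+1)
      match i with
      | 0 => simp [pvDpF_zero_left]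
      | a + 1 =>
        match j with
        | 0 => simp [pvDpF_zero_right]
        | b + 1 =>
          rw [pvDpF_succ mt a (b + 1)]
          split_ifs with hm
          · have h3 := (ih a (b + 1) (by omega)).2.2.1
            omega
          · exact le_max_right _ _
    · -- F i (j+1) ≤ F i j + 1
      match i with
      | 0 => simp [pvDpF_zero_left]
      | a + 1 =>
        match j with
        | 0 =>
          rw [pvDpF_succ]
          split_ifs with hm
          · simp [pvDpF_zero_right]
          · have h1 := (ih a 0 (by omega)).2.1
            have h2 := (ih a 0 (by omega)).2.2.2
            simp only [pvDpF_zero_right] at *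
            omega
        | b + 1 =>
          rw [pvDpF_succ mt a (b + 1)]
          have hb1 := (ih a (b + 1) (by omega)).2.1
          have hb2 := (ih a (b + 1) (by omega)).2.2.2
          split_ifs with hm
          · omega
          · apply max_le <;> omega
    · -- F (i+1) j ≤ F i j + 1
      match j with
      | 0 => simp [pvDpF_zero_right]
      | b + 1 =>
        rw [pvDpF_succ mt i b]
        split_ifs with hm
        · have h1 := (ih i b (by omega)).1
          omega
        · have h1 := (ih i b (by omega)).1
          have h3 := (ih i b (by omega)).2.2.1
          omega
    · -- F i j ≤ F (i+1) j
      match j with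
      | 0 => simp [pvDpF_zero_right]
      | b + 1 =>
        rw [pvDpF_succ mt i b]
        split_ifs with hm
        · have h2 := (ih i b (by omega)).2.1
          omega
        · exact le_max_left _ _

lemma pvDpF_mono_j (mt : Nat → Nat → Bool) (i : Nat) {j j' : Nat} (h : j ≤ j') :
    pvDpF mt i j ≤ pvDpF mt i j' := by
  obtain ⟨d, rfl⟩ : ∃ d, j' = j + d := ⟨j' - j, by omega⟩
  clear h
  induction d with
  | zero => exact le_rfl
  | succ d ih =>
    have hstep := (pvDpF_bounds mt (i + (j + d)) i (j + d) le_rfl).1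
    calc pvDpF mt i j ≤ pvDpF mt i (j + d) := ih
      _ ≤ pvDpF mt i (j + d + 1) := hstep

lemma pvDpF_mono_i (mt : Nat → Nat → Bool) (i j : Nat) :
    pvDpF mt i j ≤ pvDpF mt (i + 1) j :=
  (pvDpF_bounds mt (i + j) i j le_rfl).2.2.2

lemma pvDpF_row_step (mt : Nat → Nat → Bool) (i j : Nat) :
    pvDpF mt i (j + 1) ≤ pvDpF mt i j + 1 :=
  (pvDpF_bounds mt (i + j) i j le_rfl).2.1

lemma pvDpF_col_step (mt : Nat → Nat → Bool) (i j : Nat) :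
    pvDpF mt (i + 1) j ≤ pvDpF mt i j + 1 :=
  (pvDpF_bounds mt (i + j) i j le_rfl).2.2.1

-- how level k+1 can be reached in row i+1: carried up from row i, or via a match column
lemma pvDpF_char (mt : Nat → Nat → Bool) (i k : Nat) : ∀ j : Nat,
    (k + 1 ≤ pvDpF mt (i + 1) j) ↔
      (k + 1 ≤ pvDpF mt i j ∨
        ∃ j', 1 ≤ j' ∧ j' ≤ j ∧ mt i (j' - 1) = true ∧ k ≤ pvDpF mt i (j' - 1)) := by
  intro j
  induction j with
  | zero =>
    simp [pvDpF_zero_right]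
  | succ j ih =>
    rw [pvDpF_succ]
    constructor
    · intro h
      split_ifs at h with hm
      · -- matched at column j+1
        right
        exact ⟨j + 1, by omega, le_rfl, by simpa using hm, by simpa using h⟩
      · rcases le_max_iff.mp h with h1 | h1
        · left; exact h1
        · rcases ih.mp h1 with h2 | ⟨j', h3, h4, h5, h6⟩
          · left
            exact le_trans h2 (pvDpF_mono_j mt i (by omega))
          · right; exact ⟨j', h3, by omega, h5, h6⟩
    · intro h
      rcases h with h1 | ⟨j', h3, h4, h5, h6⟩
      · split_ifs with hm
        · have : pvDpF mt i (j + 1) ≤ pvDpF mt i j + 1 := pvDpF_row_step mt i j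
          omega
        · exact le_trans h1 (le_max_left _ _)
      · rcases Nat.lt_or_ge j' (j + 1) with hlt | hge
        · have hin : k + 1 ≤ pvDpF mt (i + 1) j :=
            ih.mpr (Or.inr ⟨j', h3, by omega, h5, h6⟩)
          split_ifs with hm
          · have hmono : pvDpF mt i (j' - 1) ≤ pvDpF mt i j := pvDpF_mono_j mt i (by omega)
            omega
          · exact le_trans hin (le_max_right _ _)
        · have : j' = j + 1 := by omega
          subst this
          simp only [Nat.add_sub_cancel] at h5 h6
          rw [if_pos h5]
          omega


-- ---------- binary search ----------
lemma pvBisGo_spec (a : List Int) (x : Int)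
    (hmono : ∀ p q, p ≤ q → q < a.length → a.getD p 0 ≤ a.getD q 0) :
    ∀ (d lo hi : Nat), hi - lo = d → lo ≤ hi → hi ≤ a.length →
      (∀ k, k < lo → a.getD k 0 ≤ x) → (∀ k, hi ≤ k → k < a.length → x < a.getD k 0) →
      (∀ k, k < pvBisGo a x lo hi → a.getD k 0 ≤ x) ∧ pvBisGo a x lo hi ≤ a.length ∧
        (∀ k, pvBisGo a x lo hi ≤ k → k < a.length → x < a.getD k 0) := by
  intro d
  induction d using Nat.strong_induction_on with
  | _ d ih =>
    intro lo hi hd hlh hha hpre hpost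
    rw [pvBisGo]
    split_ifs with hlt
    · by_cases hm : a.getD ((lo + hi) / 2) 0 ≤ x
      · rw [if_pos hm]
        refine ih (hi - ((lo + hi) / 2 + 1)) (by omega) _ _ rfl (by omega) hha ?_ hpost
        intro k hk
        rcases Nat.lt_or_ge k lo with h1 | h1
        · exact hpre k h1
        · exact le_trans (hmono k ((lo + hi) / 2) (by omega) (by omega)) hm
      · rw [if_neg hm]
        refine ih ((lo + hi) / 2 - lo) (by omega) _ _ rfl (by omega) (by omega) hpre ?_
        intro k hk hk2
        exact lt_of_lt_of_le (by omega) (hmono ((lo + hi) / 2) k hk hk2)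
    · exact ⟨fun k hk => hpre k (by omega), by omega, fun k hk hk2 => hpost k (by omega) hk2⟩

lemma pvBisGt_spec (a : List Int) (x : Int)
    (hmono : ∀ p q, p ≤ q → q < a.length → a.getD p 0 ≤ a.getD q 0) :
    (∀ k, k < pvBisGt a x → a.getD k 0 ≤ x) ∧ pvBisGt a x ≤ a.length ∧
      (∀ k, pvBisGt a x ≤ k → k < a.length → x < a.getD k 0) := by
  unfold pvBisGt
  exact pvBisGo_spec a x hmono (a.length - 0) 0 a.length rfl (by omega) le_rfl
    (by omega) (by omega)

-- ---------- threshold rows ----------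
-- t is the row-i threshold for level k: smallest column j with dp[i][j] ≥ k+1
def pvPkRow (mt : Nat → Nat → Bool) (m i k : Nat) (t : Int) : Prop :=
  (1 ≤ t ∧ t ≤ (m : Int)) ∧ ∀ j, j ≤ m → (t ≤ (j : Int) ↔ k < pvDpF mt i j)

-- T is exactly the list of row-i thresholds
def pvKP (mt : Nat → Nat → Bool) (m i : Nat) (T : List Int) : Prop :=
  T.length = pvDpF mt i m ∧ ∀ k, k < T.length → pvPkRow mt m i k (T.getD k 0)

-- cols is the sorted list of matching columns of row i
def pvColsOK (mt : Nat → Nat → Bool) (m i : Nat) (cols : List Int) : Prop :=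
  cols.Pairwise (· < ·) ∧
    ∀ c, c ∈ cols ↔ 1 ≤ c ∧ c ≤ (m : Int) ∧ mt i (c.toNat - 1) = true

lemma pvColsOK_mono {mt : Nat → Nat → Bool} {m i : Nat} {cols : List Int}
    (h : pvColsOK mt m i cols) :
    ∀ p q, p ≤ q → q < cols.length → cols.getD p 0 ≤ cols.getD q 0 := by
  intro p q hpq hq
  rcases eq_or_lt_of_le hpq with rfl | hlt
  · exact le_rfl
  · have := (List.pairwise_iff_get.mp h.1) ⟨p, by omega⟩ ⟨q, hq⟩ hlt
    rw [List.getD_eq_getElem _ _ (by omega), List.getD_eq_getElem _ _ hq]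
    simpa [List.get_eq_getElem] using le_of_lt this

-- pvBisGt cols prev finds the first matching column greater than prev
lemma pvFirstGt {mt : Nat → Nat → Bool} {m i : Nat} {cols : List Int}
    (h : pvColsOK mt m i cols) (prev c : Int) (hc : c ∈ cols) (hgt : prev < c) :
    pvBisGt cols prev < cols.length ∧ cols.getD (pvBisGt cols prev) 0 ≤ c := by
  obtain ⟨q, hq, rfl⟩ := List.getElem_of_mem hc
  obtain ⟨hpre, hlen, hpost⟩ := pvBisGt_spec cols prev (pvColsOK_mono h)
  have hq' : cols.getD q 0 = cols[q] := List.getD_eq_getElem _ _ hq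
  have hqr : pvBisGt cols prev ≤ q := by
    by_contra hcon
    have := hpre q (by omega)
    omega
  exact ⟨by omega, by
    have := pvColsOK_mono h (pvBisGt cols prev) q hqr hq
    omega⟩

lemma pvNoGt {mt : Nat → Nat → Bool} {m i : Nat} {cols : List Int}
    (h : pvColsOK mt m i cols) (prev : Int) (hnone : ¬ pvBisGt cols prev < cols.length) :
    ∀ c ∈ cols, c ≤ prev := by
  intro c hc
  obtain ⟨q, hq, rfl⟩ := List.getElem_of_mem hc
  obtain ⟨hpre, hlen, _⟩ := pvBisGt_spec cols prev (pvColsOK_mono h)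
  have := hpre q (by omega)
  rwa [List.getD_eq_getElem _ _ hq] at this

-- 'prev is the level-k0 boundary': prev ≤ j ↔ dp row i at j has reached level k0
lemma pvPrevLe {mt : Nat → Nat → Bool} {m i k0 : Nat} {prev : Int}
    (hprev : (k0 = 0 ∧ prev = 0) ∨ (1 ≤ k0 ∧ pvPkRow mt m i (k0 - 1) prev)) :
    ∀ j, j ≤ m → (prev ≤ (j : Int) ↔ k0 ≤ pvDpF mt i j) := by
  intro j hj
  rcases hprev with ⟨rfl, rfl⟩ | ⟨hk, hP⟩
  · simp
  · rw [(hP.2 j hj)]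
    omega

-- the fold body of Source B's row update, applied to one element
lemma pvG_spec (mt : Nat → Nat → Bool) (m i k0 : Nat) (cols : List Int)
    (hcols : pvColsOK mt m i cols) (prev old : Int)
    (hprev : (k0 = 0 ∧ prev = 0) ∨ (1 ≤ k0 ∧ pvPkRow mt m i (k0 - 1) prev))
    (hold : pvPkRow mt m i k0 old) :
    pvPkRow mt m (i + 1) k0
      (if pvBisGt cols prev < cols.length
        then min old (cols.getD (pvBisGt cols prev) 0) else old) := by
  obtain ⟨⟨hob1, hob2⟩, hoiff⟩ := hold
  have hprevle := pvPrevLe hprev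
  by_cases hp : pvBisGt cols prev < cols.length
  · rw [if_pos hp]
    set r := pvBisGt cols prev with hr
    have hmem : cols.getD r 0 ∈ cols := by
      rw [List.getD_eq_getElem _ _ hp]; exact List.getElem_mem hp
    obtain ⟨hcb1, hcb2, hcmt⟩ := (hcols.2 _).mp hmem
    have hgtprev : prev < cols.getD r 0 :=
      (pvBisGt_spec cols prev (pvColsOK_mono hcols)).2.2 r le_rfl hp
    constructor
    · constructor
      · exact le_min hob1 hcb1
      · exact le_trans (min_le_left _ _) hob2
    · intro j hj
      constructor
      · intro hle
        rcases le_min_iff.mp (le_refl (min old (cols.getD r 0))) with _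
        rcases min_cases old (cols.getD r 0) with ⟨heq, _⟩ | ⟨heq, _⟩
        all_goals rw [heq] at hle
        · -- old ≤ j
          have h1 := (hoiff j hj).mp hle
          have := pvDpF_mono_i mt i j
          omega
        · -- cols[r] ≤ j : use the match column
          set c := cols.getD r 0 with hcdef
          have hj' : 1 ≤ c.toNat ∧ c.toNat ≤ j := by omega
          refine (pvDpF_char mt i k0 j).mpr (Or.inr ⟨c.toNat, hj'.1, hj'.2, ?_, ?_⟩)
          · exact hcmt
          · have hle2 : prev ≤ ((c.toNat - 1 : Nat) : Int) := by omega
            exact (hprevle (c.toNat - 1) (by omega)).mp hle2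
      · intro hgt
        rcases (pvDpF_char mt i k0 j).mp hgt with h1 | ⟨j', hj1, hj2, hjm, hjk⟩
        · have := (hoiff j hj).mpr h1
          exact le_trans (min_le_left _ _) this
        · have hcmem : ((j' : Int)) ∈ cols := by
            refine (hcols.2 _).mpr ⟨by omega, by omega, ?_⟩
            simpa [Int.toNat_natCast] using hjm
          have hcgt : prev < (j' : Int) := by
            have := (hprevle (j' - 1) (by omega)).mpr hjk
            omega
          obtain ⟨_, hle⟩ := pvFirstGt hcols prev _ hcmem hcgt
          rw [← hr] at hle
          have : cols.getD r 0 ≤ (j : Int) := by omega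
          exact le_trans (min_le_right _ _) this
  · rw [if_neg hp]
    constructor
    · exact ⟨hob1, hob2⟩
    · intro j hj
      constructor
      · intro hle
        have h1 := (hoiff j hj).mp hle
        have := pvDpF_mono_i mt i j
        omega
      · intro hgt
        rcases (pvDpF_char mt i k0 j).mp hgt with h1 | ⟨j', hj1, hj2, hjm, hjk⟩
        · exact (hoiff j hj).mpr h1
        · exfalso
          have hcmem : ((j' : Int)) ∈ cols := by
            refine (hcols.2 _).mpr ⟨by omega, by omega, ?_⟩
            simpa [Int.toNat_natCast] using hjm
          have hcgt : prev < (j' : Int) := by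
            have := (hprevle (j' - 1) (by omega)).mpr hjk
            omega
          have := pvNoGt hcols prev hp _ hcmem
          omega

-- the trailing extension append of Source B's row update
lemma pvExt_spec (mt : Nat → Nat → Bool) (m i k0 : Nat) (cols : List Int)
    (hcols : pvColsOK mt m i cols) (prev : Int)
    (hprev : (k0 = 0 ∧ prev = 0) ∨ (1 ≤ k0 ∧ pvPkRow mt m i (k0 - 1) prev))
    (hlen : pvDpF mt i m = k0) :
    (pvBisGt cols prev < cols.length →
      pvPkRow mt m (i + 1) k0 (cols.getD (pvBisGt cols prev) 0) ∧
        pvDpF mt (i + 1) m = k0 + 1) ∧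
    (¬ pvBisGt cols prev < cols.length → pvDpF mt (i + 1) m = k0) := by
  have hprevle := pvPrevLe hprev
  constructor
  · intro hp
    set r := pvBisGt cols prev with hr
    have hmem : cols.getD r 0 ∈ cols := by
      rw [List.getD_eq_getElem _ _ hp]; exact List.getElem_mem hp
    obtain ⟨hcb1, hcb2, hcmt⟩ := (hcols.2 _).mp hmem
    have hgtprev : prev < cols.getD r 0 :=
      (pvBisGt_spec cols prev (pvColsOK_mono hcols)).2.2 r le_rfl hp
    have hreach : ∀ j, j ≤ m → cols.getD r 0 ≤ (j : Int) → k0 < pvDpF mt (i + 1) j := by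
      intro j hj hle
      set c := cols.getD r 0 with hcdef
      refine (pvDpF_char mt i k0 j).mpr (Or.inr ⟨c.toNat, by omega, by omega, hcmt, ?_⟩)
      have hle2 : prev ≤ ((c.toNat - 1 : Nat) : Int) := by omega
      exact (hprevle (c.toNat - 1) (by omega)).mp hle2
    have hupper : pvDpF mt (i + 1) m ≤ k0 + 1 := by
      have := pvDpF_col_step mt i m
      omega
    have hml : k0 < pvDpF mt (i + 1) m := hreach m le_rfl hcb2
    refine ⟨⟨⟨hcb1, hcb2⟩, ?_⟩, by omega⟩
    intro j hj
    constructor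
    · exact hreach j hj
    · intro hgt
      rcases (pvDpF_char mt i k0 j).mp hgt with h1 | ⟨j', hj1, hj2, hjm, hjk⟩
      · exfalso
        have := pvDpF_mono_j mt i hj
        omega
      · have hcmem : ((j' : Int)) ∈ cols := by
          refine (hcols.2 _).mpr ⟨by omega, by omega, ?_⟩
          simpa [Int.toNat_natCast] using hjm
        have hcgt : prev < (j' : Int) := by
          have := (hprevle (j' - 1) (by omega)).mpr hjk
          omega
        obtain ⟨_, hle⟩ := pvFirstGt hcols prev _ hcmem hcgt
        rw [← hr] at hle
        omega
  · intro hp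
    have hlow : k0 ≤ pvDpF mt (i + 1) m := by
      have := pvDpF_mono_i mt i m
      omega
    by_contra hne
    have hgt : k0 + 1 ≤ pvDpF mt (i + 1) m := by omega
    rcases (pvDpF_char mt i k0 m).mp hgt with h1 | ⟨j', hj1, hj2, hjm, hjk⟩
    · omega
    · have hcmem : ((j' : Int)) ∈ cols := by
        refine (hcols.2 _).mpr ⟨by omega, by omega, ?_⟩
        simpa [Int.toNat_natCast] using hjm
      have hcgt : prev < (j' : Int) := by
        have := (pvPrevLe hprev (j' - 1) (by omega)).mpr hjk
        omega
      have := pvNoGt hcols prev hp _ hcmem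
      omega


-- ---------- the row-update fold, in structural form ----------
def pvRowAux (cols : List Int) : Int → List Int → List Int
  | _, [] => []
  | prev, old :: rest =>
    (if pvBisGt cols prev < cols.length
      then min old (cols.getD (pvBisGt cols prev) 0) else old) :: pvRowAux cols old rest

def pvLastD : Int → List Int → Int
  | prev, [] => prev
  | _, old :: rest => pvLastD old rest

lemma pvRowUpd_fold (cols : List Int) : ∀ (T acc : List Int) (prev : Int),
    T.foldl (fun (s : List Int × Int) old =>
      let p := pvBisGt cols s.2
      (s.1 ++ [if p < cols.length then min old (cols.getD p 0) else old], old)) (acc, prev)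
    = (acc ++ pvRowAux cols prev T, pvLastD prev T) := by
  intro T
  induction T with
  | nil => intro acc prev; simp [pvRowAux, pvLastD]
  | cons old rest ih =>
    intro acc prev
    simp only [List.foldl_cons, ih, pvRowAux, pvLastD, List.append_assoc, List.cons_append,
      List.nil_append]

lemma pvRowUpd_eq (cols T : List Int) :
    pvRowUpd cols T =
      (if pvBisGt cols (pvLastD 0 T) < cols.length
        then pvRowAux cols 0 T ++ [cols.getD (pvBisGt cols (pvLastD 0 T)) 0]
        else pvRowAux cols 0 T) := by
  unfold pvRowUpd
  rw [pvRowUpd_fold cols T [] 0]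
  simp only [List.nil_append]

lemma pvRowAux_spec (mt : Nat → Nat → Bool) (m i : Nat) (cols : List Int)
    (hcols : pvColsOK mt m i cols) :
    ∀ (T : List Int) (k0 : Nat) (prev : Int),
      ((k0 = 0 ∧ prev = 0) ∨ (1 ≤ k0 ∧ pvPkRow mt m i (k0 - 1) prev)) →
      (∀ q, q < T.length → pvPkRow mt m i (k0 + q) (T.getD q 0)) →
      (pvRowAux cols prev T).length = T.length ∧
        ∀ q, q < T.length → pvPkRow mt m (i + 1) (k0 + q) ((pvRowAux cols prev T).getD q 0) := by
  intro T
  induction T with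
  | nil => intro k0 prev _ _; simp [pvRowAux]
  | cons old rest ih =>
    intro k0 prev hprev hT
    have hhead : pvPkRow mt m (i + 1) k0
        (if pvBisGt cols prev < cols.length
          then min old (cols.getD (pvBisGt cols prev) 0) else old) :=
      pvG_spec mt m i k0 cols hcols prev old hprev (by simpa using hT 0 (by simp))
    have hrest := ih (k0 + 1) old
      (Or.inr ⟨by omega, by simpa using hT 0 (by simp)⟩)
      (fun q hq => by
        have h := hT (q + 1) (by simp; omega)
        have e : k0 + 1 + q = k0 + (q + 1) := by omega
        rw [e]
        simpa using h)
    refine ⟨by simp [pvRowAux, hrest.1], ?_⟩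
    intro q hq
    match q with
    | 0 => simpa [pvRowAux] using hhead
    | q + 1 =>
      have h := hrest.2 q (by simp at hq; omega)
      have e : k0 + (q + 1) = k0 + 1 + q := by omega
      rw [e]
      simpa [pvRowAux] using h

lemma pvLastD_spec (mt : Nat → Nat → Bool) (m i : Nat) :
    ∀ (T : List Int) (k0 : Nat) (prev : Int),
      ((k0 = 0 ∧ prev = 0) ∨ (1 ≤ k0 ∧ pvPkRow mt m i (k0 - 1) prev)) →
      (∀ q, q < T.length → pvPkRow mt m i (k0 + q) (T.getD q 0)) →
      ((k0 + T.length = 0 ∧ pvLastD prev T = 0) ∨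
        (1 ≤ k0 + T.length ∧ pvPkRow mt m i (k0 + T.length - 1) (pvLastD prev T))) := by
  intro T
  induction T with
  | nil => intro k0 prev hprev _; simpa [pvLastD] using hprev
  | cons old rest ih =>
    intro k0 prev hprev hT
    have := ih (k0 + 1) old
      (Or.inr ⟨by omega, by simpa using hT 0 (by simp)⟩)
      (fun q hq => by
        have h := hT (q + 1) (by simp; omega)
        have e : k0 + 1 + q = k0 + (q + 1) := by omega
        rw [e]
        simpa using h)
    rcases this with ⟨h1, _⟩ | ⟨h1, h2⟩
    · omega
    · refine Or.inr ⟨by simp; omega, ?_⟩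
      have hlen : k0 + 1 + rest.length - 1 = k0 + (old :: rest).length - 1 := by
        simp
      rw [hlen] at h2
      simpa [pvLastD] using h2

-- the whole row update turns the row-i threshold list into the row-(i+1) one
lemma pvRowUpd_KP (mt : Nat → Nat → Bool) (m i : Nat) (cols : List Int)
    (hcols : pvColsOK mt m i cols) (T : List Int) (hT : pvKP mt m i T) :
    pvKP mt m (i + 1) (pvRowUpd cols T) := by
  obtain ⟨hTlen, hTel⟩ := hT
  have hprev0 : ((0 : Nat) = 0 ∧ (0 : Int) = 0) ∨ (1 ≤ 0 ∧ pvPkRow mt m i (0 - 1) 0) :=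
    Or.inl ⟨rfl, rfl⟩
  have hTel' : ∀ q, q < T.length → pvPkRow mt m i (0 + q) (T.getD q 0) := by
    intro q hq; simpa using hTel q hq
  have haux := pvRowAux_spec mt m i cols hcols T 0 0 hprev0 hTel'
  have hlast := pvLastD_spec mt m i T 0 0 hprev0 hTel'
  simp only [Nat.zero_add] at haux hlast
  have hext := pvExt_spec mt m i T.length cols hcols (pvLastD 0 T) hlast (by omega)
  rw [pvRowUpd_eq]
  split_ifs with hp
  · constructor
    · have := (hext.1 hp).2
      simp [haux.1, this]
    · intro k hk
      simp only [List.length_append, List.length_cons, List.length_nil, haux.1] at hk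
      rcases Nat.lt_or_ge k T.length with hlt | hge
      · rw [List.getD_append _ _ _ _ (by omega)]
        simpa using haux.2 k hlt
      · have hkeq : k = T.length := by omega
        subst hkeq
        rw [List.getD_eq_getElem _ _ (by simp [haux.1])]
        rw [List.getElem_append_right (by omega)]
        simp only [haux.1]
        simpa using (hext.1 hp).1
  · constructor
    · have := hext.2 hp
      simp [haux.1, this]
    · intro k hk
      rw [haux.1] at hk
      simpa using haux.2 k hk


-- ---------- A's table fill, in structural form ----------
def pvRowN (ref hyp : List String) (i : Nat) (dp : List (List Nat)) : Nat → List (List Nat)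
  | 0 => dp
  | j + 1 => pvStepA ref hyp (pvRowN ref hyp i dp j) i (j + 1)

def pvFillN (ref hyp : List String) (init : List (List Nat)) (m : Nat) : Nat → List (List Nat)
  | 0 => init
  | i + 1 => pvRowN ref hyp (i + 1) (pvFillN ref hyp init m i) m

lemma pvRowA_conv (ref hyp : List String) (i : Nat) :
    ∀ (j : Nat) (t : List (List Nat)),
      (PySem.List.pyRange 1 ((j : Int) + 1) 1).foldl
        (fun dp x => pvStepA ref hyp dp i x.toNat) t = pvRowN ref hyp i t j := by
  intro j
  induction j with
  | zero => intro t; rw [PySem.List.pyRange_one_eq_nil (by omega)]; rfl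
  | succ j ih =>
    intro t
    have h1 : ((j + 1 : Nat) : Int) + 1 = ((j : Int) + 1) + 1 := by push_cast; ring
    rw [h1, PySem.List.pyRange_one_succ_right (by omega), List.foldl_append]
    simp only [List.foldl_cons, List.foldl_nil, ih]
    have h2 : ((j : Int) + 1).toNat = j + 1 := by omega
    rw [h2, pvRowN]

lemma pvFillA_conv (ref hyp : List String) (m : Nat) :
    ∀ (n : Nat) (t : List (List Nat)),
      (PySem.List.pyRange 1 ((n : Int) + 1) 1).foldl
        (fun dp x => (PySem.List.pyRange 1 ((m : Int) + 1) 1).foldl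
          (fun dp y => pvStepA ref hyp dp x.toNat y.toNat) dp) t
        = pvFillN ref hyp t m n := by
  intro n
  induction n with
  | zero =>
    intro t
    have h0 : PySem.List.pyRange 1 (((0 : Nat) : Int) + 1) 1 = [] :=
      PySem.List.pyRange_one_eq_nil (by omega)
    rw [h0]
    rfl
  | succ n ih =>
    intro t
    have h1 : ((n + 1 : Nat) : Int) + 1 = ((n : Int) + 1) + 1 := by push_cast; ring
    rw [h1, PySem.List.pyRange_one_succ_right (a := 1) (b := (n : Int) + 1) (by omega),
      List.foldl_append]
    simp only [List.foldl_cons, List.foldl_nil, ih]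
    rw [pvRowA_conv]
    have h2 : ((n : Int) + 1).toNat = n + 1 := by omega
    rw [h2, pvFillN]

lemma pvFillA_eq_N (ref hyp : List String) (n m : Nat) :
    pvFillA ref hyp n m =
      pvFillN ref hyp (List.replicate (n + 1) (List.replicate (m + 1) 0)) m n := by
  unfold pvFillA
  exact pvFillA_conv ref hyp m n _

-- table shape and cell access lemmas
def pvShape (t : List (List Nat)) (n m : Nat) : Prop :=
  t.length = n + 1 ∧ ∀ a, a ≤ n → (t.getD a []).length = m + 1

lemma pvGet2_set2_same {t : List (List Nat)} {i j : Nat} (v : Nat)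
    (hi : i < t.length) (hj : j < (t.getD i []).length) :
    pvGet2 (pvSet2 t i j v) i j = v := by
  have hj' : j < t[i].length := by
    rwa [List.getD_eq_getElem?_getD, List.getElem?_eq_getElem hi] at hj
  simp [pvGet2, pvSet2, List.getD_eq_getElem?_getD, hi, hj']

lemma pvGet2_set2_ne {t : List (List Nat)} {i j a b : Nat} (v : Nat)
    (h : a ≠ i ∨ b ≠ j) : pvGet2 (pvSet2 t i j v) a b = pvGet2 t a b := by
  rcases eq_or_ne a i with rfl | hai
  · have hb : b ≠ j := by tauto
    by_cases hlen : a < t.length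
    · simp [pvGet2, pvSet2, List.getD_eq_getElem?_getD, hlen, Ne.symm hb]
    · have hn : ∀ (x : List Nat), (t.set a x)[a]? = none := fun x =>
        List.getElem?_eq_none (by simpa using (show t.length ≤ a by omega))
      simp [pvGet2, pvSet2, List.getD_eq_getElem?_getD, hn,
        List.getElem?_eq_none (show t.length ≤ a by omega)]
  · simp [pvGet2, pvSet2, List.getD_eq_getElem?_getD, Ne.symm hai]

lemma pvShape_set2 {t : List (List Nat)} {n m : Nat} (h : pvShape t n m)
    (i j v : Nat) (hi : i ≤ n) : pvShape (pvSet2 t i j v) n m := by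
  obtain ⟨h1, h2⟩ := h
  refine ⟨by simp [pvSet2, h1], fun a ha => ?_⟩
  by_cases hai : a = i
  · subst hai
    have h3 := h2 a ha
    rw [List.getD_eq_getElem?_getD, List.getElem?_eq_getElem (show a < t.length by omega)] at h3
    rw [pvSet2, List.getD_eq_getElem?_getD, List.getElem?_set]
    simp [show a < t.length by omega]
    simpa using h3
  · rw [pvSet2, List.getD_eq_getElem?_getD, List.getElem?_set]
    simp [Ne.symm hai, ← List.getD_eq_getElem?_getD, h2 a ha]

-- the dp-table invariant: rows < i done, row i done through column j, rest still 0
def pvInvA (ref hyp : List String) (n m i j : Nat) (t : List (List Nat)) : Prop :=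
  pvShape t n m ∧ ∀ a b, a ≤ n → b ≤ m →
    pvGet2 t a b = if a < i ∨ (a = i ∧ b ≤ j) then pvDpF (pvMt ref hyp) a b else 0

lemma pvStepA_inv (ref hyp : List String) (n m i j : Nat)
    (hi : i + 1 ≤ n) (hj : j + 1 ≤ m) (t : List (List Nat))
    (hA : pvInvA ref hyp n m (i + 1) j t) :
    pvInvA ref hyp n m (i + 1) (j + 1) (pvStepA ref hyp t (i + 1) (j + 1)) := by
  obtain ⟨⟨hl1, hl2⟩, hv⟩ := hA
  have g1 : pvGet2 t i j = pvDpF (pvMt ref hyp) i j := by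
    rw [hv i j (by omega) (by omega), if_pos (by omega)]
  have g2 : pvGet2 t i (j + 1) = pvDpF (pvMt ref hyp) i (j + 1) := by
    rw [hv i (j + 1) (by omega) (by omega), if_pos (by omega)]
  have g3 : pvGet2 t (i + 1) j = pvDpF (pvMt ref hyp) (i + 1) j := by
    rw [hv (i + 1) j (by omega) (by omega), if_pos (by omega)]
  have hstep : pvStepA ref hyp t (i + 1) (j + 1)
      = pvSet2 t (i + 1) (j + 1) (pvDpF (pvMt ref hyp) (i + 1) (j + 1)) := by
    unfold pvStepA
    simp only [Nat.add_sub_cancel]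
    rw [show pvAnyMatch (ref.getD i "") (hyp.getD j "") = pvMt ref hyp i j from rfl]
    cases h : pvMt ref hyp i j
    · simp only [Bool.false_eq_true, if_false]
      congr 1
      rw [g2, g3, pvDpF_succ, h]
      simp
    · simp only [if_true]
      congr 1
      rw [g1, pvDpF_succ, h]
      simp
  rw [hstep]
  refine ⟨pvShape_set2 ⟨hl1, hl2⟩ _ _ _ (by omega), ?_⟩
  intro a b ha hb
  by_cases hab : a = i + 1 ∧ b = j + 1
  · obtain ⟨rfl, rfl⟩ := hab
    rw [pvGet2_set2_same _ (by omega) (by rw [hl2 _ (by omega)]; omega), if_pos (by omega)]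
  · rw [pvGet2_set2_ne _ (by tauto), hv a b ha hb]
    have hc : (a < i + 1 ∨ (a = i + 1 ∧ b ≤ j + 1)) ↔ (a < i + 1 ∨ (a = i + 1 ∧ b ≤ j)) := by
      omega
    simp only [hc]

lemma pvRowA_inv (ref hyp : List String) (n m i : Nat) (hi : i + 1 ≤ n)
    (t : List (List Nat)) (hA : pvInvA ref hyp n m (i + 1) 0 t) :
    ∀ j, j ≤ m → pvInvA ref hyp n m (i + 1) j (pvRowN ref hyp (i + 1) t j) := by
  intro j
  induction j with
  | zero => exact fun _ => hA
  | succ j ih =>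
    intro hj
    rw [pvRowN]
    exact pvStepA_inv ref hyp n m i j hi (by omega) _ (ih (by omega))

lemma pvInvA_init (ref hyp : List String) (n m : Nat) :
    pvInvA ref hyp n m 0 m (List.replicate (n + 1) (List.replicate (m + 1) 0)) := by
  have hg : ∀ a b : Nat,
      pvGet2 (List.replicate (n + 1) (List.replicate (m + 1) (0 : Nat))) a b = 0 := by
    intro a b
    simp only [pvGet2, List.getD_eq_getElem?_getD, List.getElem?_replicate]
    split_ifs <;> simp [List.getElem?_replicate]
    split_ifs <;> simp
  refine ⟨⟨by simp, fun a ha => ?_⟩, ?_⟩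
  · rw [List.getD_eq_getElem?_getD, List.getElem?_replicate]
    simp [show a < n + 1 by omega]
  · intro a b ha hb
    rw [hg]
    by_cases hc : a < 0 ∨ (a = 0 ∧ b ≤ m)
    · rw [if_pos hc]
      have ha0 : a = 0 := by omega
      subst ha0
      rw [pvDpF_zero_left]
    · rw [if_neg hc]

lemma pvInvA_shift (ref hyp : List String) (n m i : Nat) (t : List (List Nat))
    (hA : pvInvA ref hyp n m i m t) : pvInvA ref hyp n m (i + 1) 0 t := by
  obtain ⟨hs, hv⟩ := hA
  refine ⟨hs, ?_⟩
  intro a b ha hb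
  rw [hv a b ha hb]
  by_cases hc : a < i ∨ (a = i ∧ b ≤ m)
  · rw [if_pos hc, if_pos (by omega)]
  · rw [if_neg hc]
    by_cases hc2 : a < i + 1 ∨ (a = i + 1 ∧ b ≤ 0)
    · rw [if_pos hc2]
      have hb0 : b = 0 := by omega
      rw [hb0, pvDpF_zero_right]
    · rw [if_neg hc2]

lemma pvFillA_inv (ref hyp : List String) (n m : Nat) :
    ∀ i, i ≤ n → pvInvA ref hyp n m i m
      (pvFillN ref hyp (List.replicate (n + 1) (List.replicate (m + 1) 0)) m i) := by
  intro i
  induction i with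
  | zero => exact fun _ => pvInvA_init ref hyp n m
  | succ i ih =>
    intro hi
    rw [pvFillN]
    exact pvRowA_inv ref hyp n m i hi _ (pvInvA_shift ref hyp n m i _ (ih (by omega))) m le_rfl

-- ---------- bridges between A's re-split predicate and B's cached splits ----------
lemma pvMatchL_bridge (ref hyp : List String) (a b : Nat) :
    pvMatchL ((ref.map PySem.Str.split₀).getD a []) ((hyp.map PySem.Str.split₀).getD b [])
      = pvMt ref hyp a b := by
  have hsplit : PySem.Str.split₀ "" = [] := by decide
  unfold pvMatchL pvMt pvAnyMatch
  rcases h1 : ref[a]? with _ | r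
  · simp [List.getD_eq_getElem?_getD, List.getElem?_map, h1, hsplit]
  · rcases h2 : hyp[b]? with _ | hh
    · simp [List.getD_eq_getElem?_getD, List.getElem?_map, h1, h2, hsplit]
    · simp [List.getD_eq_getElem?_getD, List.getElem?_map, h1, h2]

lemma pvCols_ok (ref hyp : List String) (k : Nat) :
    pvColsOK (pvMt ref hyp) hyp.length k
      ((PySem.List.pyRange 1 ((hyp.length : Int) + 1) 1).filter
        (fun j => pvMatchL ((ref.map PySem.Str.split₀).getD k [])
          ((hyp.map PySem.Str.split₀).getD (j - 1).toNat []))) := by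
  constructor
  · exact (PySem.List.pairwise_lt_pyRange_one 1 ((hyp.length : Int) + 1)).filter _
  · intro c
    rw [List.mem_filter, PySem.List.mem_pyRange_one]
    constructor
    · rintro ⟨⟨hc1, hc2⟩, hp⟩
      rw [pvMatchL_bridge ref hyp k (c - 1).toNat] at hp
      refine ⟨hc1, by omega, ?_⟩
      have : (c - 1).toNat = c.toNat - 1 := by omega
      rwa [this] at hp
    · rintro ⟨hc1, hc2, hp⟩
      refine ⟨⟨hc1, by omega⟩, ?_⟩
      rw [pvMatchL_bridge ref hyp k (c - 1).toNat]
      have : (c - 1).toNat = c.toNat - 1 := by omega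
      rwa [this]

-- ---------- the threshold fill satisfies the row invariant ----------
lemma pvFillThr_inv (ref hyp : List String) :
    ∀ k, k ≤ ref.length →
      ((pvFillThr (hyp.map PySem.Str.split₀) hyp.length
          ((ref.map PySem.Str.split₀).take k)).1.length = k + 1) ∧
      (∀ i, i ≤ k → pvKP (pvMt ref hyp) hyp.length i
        ((pvFillThr (hyp.map PySem.Str.split₀) hyp.length
          ((ref.map PySem.Str.split₀).take k)).1.getD i [])) ∧
      ((pvFillThr (hyp.map PySem.Str.split₀) hyp.length
          ((ref.map PySem.Str.split₀).take k)).2 =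
        (pvFillThr (hyp.map PySem.Str.split₀) hyp.length
          ((ref.map PySem.Str.split₀).take k)).1.getD k []) := by
  intro k
  induction k with
  | zero =>
    intro _
    refine ⟨by simp [pvFillThr], ?_, by simp [pvFillThr]⟩
    intro i hi
    have : i = 0 := by omega
    subst this
    constructor
    · simp [pvFillThr, pvDpF_zero_left]
    · intro q hq
      simp [pvFillThr] at hq
  | succ k ih =>
    intro hk
    have hk' : k < (ref.map PySem.Str.split₀).length := by simp; omega
    obtain ⟨ih1, ih2, ih3⟩ := ih (by omega)
    have htake : (ref.map PySem.Str.split₀).take (k + 1)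
        = (ref.map PySem.Str.split₀).take k ++ [(ref.map PySem.Str.split₀).getD k []] := by
      rw [List.take_succ, List.getElem?_eq_getElem hk', List.getD_eq_getElem _ _ hk']
      rfl
    unfold pvFillThr
    rw [htake, List.foldl_append]
    simp only [List.foldl_cons, List.foldl_nil]
    rw [show (((ref.map PySem.Str.split₀).take k).foldl _ ([[]], []))
        = pvFillThr (hyp.map PySem.Str.split₀) hyp.length ((ref.map PySem.Str.split₀).take k)
      from rfl]
    set s := pvFillThr (hyp.map PySem.Str.split₀) hyp.length ((ref.map PySem.Str.split₀).take k)
      with hs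
    set cols := (PySem.List.pyRange 1 ((hyp.length : Int) + 1) 1).filter
      (fun j => pvMatchL ((ref.map PySem.Str.split₀).getD k [])
        ((hyp.map PySem.Str.split₀).getD (j - 1).toNat [])) with hcols
    have hKPk : pvKP (pvMt ref hyp) hyp.length k s.2 := by
      rw [ih3]
      exact ih2 k le_rfl
    have hKPnew := pvRowUpd_KP (pvMt ref hyp) hyp.length k cols
      (pvCols_ok ref hyp k) s.2 hKPk
    refine ⟨by simp [ih1], ?_, ?_⟩
    · intro i hi
      rcases Nat.lt_or_ge i (k + 1) with hlt | hge
      · rw [List.getD_append _ _ _ _ (by omega)]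
        exact ih2 i (by omega)
      · have : i = k + 1 := by omega
        subst this
        rw [List.getD_eq_getElem _ _ (by simp [ih1])]
        rw [List.getElem_append_right (by omega)]
        simp only [ih1]
        simpa using hKPnew
    · rw [List.getD_eq_getElem _ _ (by simp [ih1])]
      rw [List.getElem_append_right (by omega)]
      simp [ih1]

-- ---------- lcs(i, j) reads the dp value from the threshold row ----------
lemma pvLcs_of_KP (mt : Nat → Nat → Bool) (m i : Nat) (T : List Int)
    (h : pvKP mt m i T) (j : Nat) (hj : j ≤ m) :
    pvBisGt T ((j : Nat) : Int) = pvDpF mt i j := by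
  have hmono : ∀ p q, p ≤ q → q < T.length → T.getD p 0 ≤ T.getD q 0 := by
    intro p q hpq hq
    have hPq := h.2 q hq
    have hPp := h.2 p (by omega)
    have hb := hPq.1
    have h1 : q < pvDpF mt i (T.getD q 0).toNat := (hPq.2 _ (by omega)).mp (by omega)
    have h2 : p < pvDpF mt i (T.getD q 0).toNat := by omega
    have := (hPp.2 _ (by omega)).mpr h2
    omega
  obtain ⟨hpre, hlen, hpost⟩ := pvBisGt_spec T (j : Int) hmono
  apply le_antisymm
  · rcases Nat.eq_zero_or_pos (pvBisGt T (j : Int)) with hr0 | hrpos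
    · omega
    · have h1 := hpre (pvBisGt T (j : Int) - 1) (by omega)
      have hP := h.2 (pvBisGt T (j : Int) - 1) (by omega)
      have := (hP.2 j hj).mp h1
      omega
  · by_contra hc
    push_neg at hc
    have hFm : pvDpF mt i j ≤ pvDpF mt i m := pvDpF_mono_j mt i hj
    have hlen2 : T.length = pvDpF mt i m := h.1
    have hrlen : pvBisGt T (j : Int) < T.length := by omega
    have hgt := hpost _ le_rfl hrlen
    have hP := h.2 _ hrlen
    have := (hP.2 j hj).mpr (by omega)
    omega

-- ---------- traceback equivalence ----------
lemma pvTrace_eq (ref hyp : List String) (n m : Nat)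
    (TA : List (List Nat)) (rows : List (List Int))
    (cT : ∀ x y, x ≤ n → y ≤ m → pvGet2 TA x y = pvDpF (pvMt ref hyp) x y)
    (cL : ∀ x y, x ≤ n → y ≤ m → pvLcs rows x ((y : Nat) : Int) = pvDpF (pvMt ref hyp) x y) :
    ∀ i j acc, i ≤ n → j ≤ m →
      pvTraceA ref hyp TA i j acc
        = pvTraceB ref hyp (ref.map PySem.Str.split₀) (hyp.map PySem.Str.split₀) rows i j acc := by
  suffices H : ∀ k i j acc, i + j ≤ k → i ≤ n → j ≤ m →
      pvTraceA ref hyp TA i j acc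
        = pvTraceB ref hyp (ref.map PySem.Str.split₀) (hyp.map PySem.Str.split₀) rows i j acc by
    intro i j acc hi hj
    exact H (i + j) i j acc le_rfl hi hj
  intro k
  induction k with
  | zero =>
    intro i j acc hk hi hj
    obtain ⟨rfl, rfl⟩ : i = 0 ∧ j = 0 := by omega
    simp [pvTraceA, pvTraceB]
  | succ k ih =>
    intro i j acc hk hi hj
    match i, j with
    | 0, j =>
      cases j with
      | zero => simp [pvTraceA, pvTraceB]
      | succ j => simp [pvTraceA, pvTraceB]
    | i + 1, 0 => simp [pvTraceA, pvTraceB]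
    | i + 1, j + 1 =>
      rw [pvTraceA.eq_def, pvTraceB.eq_def]
      simp only []
      rw [pvMatchL_bridge ref hyp i j]
      rw [show pvAnyMatch (ref.getD i "") (hyp.getD j "") = pvMt ref hyp i j from rfl]
      cases h : pvMt ref hyp i j
      · simp only [Bool.false_eq_true, if_false]
        have e1 : pvLcs rows i ((j : Int) + 1) = pvDpF (pvMt ref hyp) i (j + 1) := by
          have := cL i (j + 1) (by omega) hj
          have ecast : (((j + 1 : Nat)) : Int) = (j : Int) + 1 := by push_cast; ring
          rwa [ecast] at this
        have e2 : pvLcs rows (i + 1) ((j : Nat) : Int) = pvDpF (pvMt ref hyp) (i + 1) j :=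
          cL (i + 1) j hi (by omega)
        rw [cT i (j + 1) (by omega) hj, cT (i + 1) j hi (by omega), e1, e2]
        split_ifs with hcmp
        · exact ih i (j + 1) _ (by omega) (by omega) hj
        · exact ih (i + 1) j _ (by omega) hi (by omega)
      · simp only [if_true]
        exact ih i j _ (by omega) (by omega) (by omega)

-- ===== VERDICT (by name: the statement is the Claim_ definition above) =====
theorem align_words_spec : Claim_equal_align_words := by
  intro ref hyp _
  show (pvTraceA ref hyp (pvFillA ref hyp ref.length hyp.length) ref.length hyp.length []).reverse
      = (pvTraceB ref hyp (ref.map PySem.Str.split₀) (hyp.map PySem.Str.split₀)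
          (pvFillThr (hyp.map PySem.Str.split₀) hyp.length (ref.map PySem.Str.split₀)).1
          ref.length hyp.length []).reverse
  apply congrArg List.reverse
  have hA := pvFillA_inv ref hyp ref.length hyp.length ref.length le_rfl
  have cT : ∀ x y, x ≤ ref.length → y ≤ hyp.length →
      pvGet2 (pvFillA ref hyp ref.length hyp.length) x y = pvDpF (pvMt ref hyp) x y := by
    intro x y hx hy
    rw [pvFillA_eq_N]
    rw [hA.2 x y hx hy, if_pos (by omega)]
  have hrefs : (ref.map PySem.Str.split₀).take ref.length = ref.map PySem.Str.split₀ := by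
    apply List.take_of_length_le
    simp
  have hB := pvFillThr_inv ref hyp ref.length le_rfl
  rw [hrefs] at hB
  have cL : ∀ x y, x ≤ ref.length → y ≤ hyp.length →
      pvLcs (pvFillThr (hyp.map PySem.Str.split₀) hyp.length (ref.map PySem.Str.split₀)).1
        x ((y : Nat) : Int) = pvDpF (pvMt ref hyp) x y := by
    intro x y hx hy
    unfold pvLcs
    exact pvLcs_of_KP (pvMt ref hyp) hyp.length x _ (hB.2.1 x hx) y hy
  exact pvTrace_eq ref hyp ref.length hyp.length _ _ cT cL
    ref.length hyp.length [] le_rfl le_rfl
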